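-- pv_equiv track=rewrite | github.com/dkdk22/ALTpracts | distancias.py | levenshtein_cota_optimista
-- ===== SOURCE A (Python) =====
-- def levenshtein(x, y, threshold):
-- # Calculem la distància de Levenshtein utilitzant vectors en comptes de matrius per optimitzar l'espai
--
--     lenX, lenY = len(x), len(y)
--     vAnt = [0] * (lenX + 1)  # Vector anterior
--     vAct = [0] * (lenX + 1)  # Vector actual
--
--     # Inicialitzem la primera columna
--     for i in range(1, lenX + 1):
--         vAnt[i] = vAnt[i - 1] + 1
--
--     # Recorrem cada fila
--     for j in range(1, lenY + 1):
--         vAct[0] = vAnt[0] + 1  # Inicialitzem la primera cel·la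
--
--         paradaPorThreshold = True  # Comprovem si hem de parar pel llindar
--         if(vAct[0] <= threshold):
--             paradaPorThreshold = False
--         elif(vAct[0] == threshold and lenX - i == lenY - j):
--             paradaPorThreshold = False
--
--         # Recorrem cada columna
--         for i in range(1, lenX + 1):
--             vAct[i] = min(vAct[i - 1] + 1,  # Inserció
--                           vAnt[i] + 1,      # Eliminació
--                           vAnt[i - 1] + (x[i - 1] != y[j - 1]))  # Substitució
--
--             # Si la distància és menor que el llindar, continuem
--             if(vAct[i] < threshold):
--                 paradaPorThreshold = False
--             elif(vAct[i] == threshold and lenX - i == lenY - j):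
--                 paradaPorThreshold = False
--
--         # Si s'ha superat el llindar, parem i tornem el llindar + 1
--         if(paradaPorThreshold):
--             return threshold + 1
--
--         # Actualitzem els vectors per la següent iteració
--         vAct, vAnt = vAnt, vAct
--
--     return vAnt[lenX]  # Retornem la distància final
--
-- def levenshtein_cota_optimista(x, y, threshold):
--     # S'afegeixen totes les lletres de les dues cadenes a un conjunt
--     dic = set(x).union(set(y))
--
--     # Inicialitzem un diccionari per emmagatzemar les sumes de les diferències
--     res = {1: 0, -1: 0}
--
--     # Recorrem el conjunt de caràcters
--     for letra in dic:
--         # Calculem la diferència d'aparicions de cada lletra en ambdues cadenes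
--         dif = x.count(letra) - y.count(letra)
--
--         # Si la diferència és negativa, la sumem al comptador de caràcters faltants en y
--         if dif < 0:
--             res[1] += abs(dif)
--         # Si la diferència és positiva, la sumem al comptador de caràcters faltants en x
--         else:
--             res[-1] += abs(dif)
--
--     # Comprovem si el resultat final és més gran o igual que el llindar donat
--     res = max(res[1], res[-1])
--
--     if res > threshold:
--         # Si la diferència és major que el llindar, retornem threshold + 1
--         return threshold + 1
--     else:
--         # En cas contrari, calculem la distància de Levenshtein
--         return levenshtein(x, y, threshold)
-- ===== SOURCE B (Python) =====
-- def row_ok(row, j, n, m, threshold):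
--     # A row passes if we may keep going under the threshold rule.
--     return row[0] <= threshold or any(
--         v < threshold or (v == threshold and n - i == m - j)
--         for i, v in enumerate(row[1:], 1))
--
--
-- def levenshtein(x, y, threshold):
--     # Staged passes: first build the COMPLETE DP matrix (every row), then in a
--     # separate pass test each row against the threshold rule; no fused early exit.
--     n = len(x)
--     rows = [list(range(n + 1))]
--     for cy in y:
--         prev = rows[-1]
--         new = [prev[0] + 1]
--         for cx, p0, p1 in zip(x, prev, prev[1:]):
--             new.append(min(new[-1] + 1, p1 + 1, p0 + (cx != cy)))
--         rows.append(new)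
--     if any(not row_ok(row, j, n, len(y), threshold)
--            for j, row in enumerate(rows[1:], 1)):
--         return threshold + 1
--     return rows[-1][n]
--
--
-- def levenshtein_cota_optimista(x, y, threshold):
--     # One-pass signed character counter instead of set + repeated count() scans;
--     # the optimistic bound is the closed form (S + |len(x)-len(y)|) // 2.
--     cnt = {}
--     for c in x:
--         cnt[c] = cnt.get(c, 0) + 1
--     for c in y:
--         cnt[c] = cnt.get(c, 0) - 1
--     s = sum(abs(v) for v in cnt.values())
--     res = (s + abs(len(x) - len(y))) // 2
--     if res > threshold:
--         return threshold + 1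
--     return levenshtein(x, y, threshold)
-- ===== Notes on version B (the rewrite author's own statement) =====
-- stated objective: alternative
-- what changed: The optimistic bound comes from one signed character counter and the closed form (S + |len(x)-len(y)|) // 2 instead of A's set union with repeated count() scans bucketed by sign and combined by max, and the DP helper is decomposed into staged passes: it first materialises the COMPLETE matrix of DP rows (no early exit, no in-place two-vector swapping, no running flag) and only then, in a separate pass, tests every row with a pure predicate row_ok and returns threshold+1 if any row fails, else the matrix's last cell.
import Mathlib
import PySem

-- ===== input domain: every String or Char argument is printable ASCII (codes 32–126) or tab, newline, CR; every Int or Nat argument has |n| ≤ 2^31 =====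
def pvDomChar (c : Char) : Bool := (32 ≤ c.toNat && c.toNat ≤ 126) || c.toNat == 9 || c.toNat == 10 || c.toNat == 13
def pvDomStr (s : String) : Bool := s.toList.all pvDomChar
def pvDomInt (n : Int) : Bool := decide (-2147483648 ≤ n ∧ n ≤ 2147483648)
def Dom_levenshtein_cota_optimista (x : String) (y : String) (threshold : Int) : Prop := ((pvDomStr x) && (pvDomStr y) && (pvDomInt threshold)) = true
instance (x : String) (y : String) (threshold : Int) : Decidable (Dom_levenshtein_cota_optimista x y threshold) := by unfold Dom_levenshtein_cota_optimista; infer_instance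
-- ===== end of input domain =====

-- B replaces A's set + repeated count() scans by one signed character counter with the
-- closed-form bound (S + |len x - len y|) // 2, and its DP helper builds the complete
-- matrix of rows first and then tests the threshold rule in a separate pass, instead of
-- A's fused two-vector loop with an early exit (objective: alternative decomposition).


-- ===== PORT A =====
-- A's helper `levenshtein`: outer `for j in range(1, lenY+1)` as recursion over the range
-- list, state = (vAnt, vAct); `return threshold + 1` inside the loop is the early exit.
def pvLevARows (x : List Char) (y : List Char) (threshold : Int) :
    List Int → List Int → List Int → Int
  | [], vAnt, _ => PySem.List.pyGetD vAnt (x.length : Int) 0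
  | j :: js, vAnt, vAct =>
    let lenX : Int := (x.length : Int)
    let lenY : Int := (y.length : Int)
    let vAct1 := PySem.List.pySetD vAct 0 (PySem.List.pyGetD vAnt 0 0 + 1)
    -- Python's `elif` here first tests `vAct[0] == threshold` (always False in this branch),
    -- so the stale loop variable `i` is never evaluated; transliterated with i := lenX.
    let parada0 : Bool :=
      if PySem.List.pyGetD vAct1 0 0 ≤ threshold then false
      else if PySem.List.pyGetD vAct1 0 0 = threshold ∧ lenX - lenX = lenY - j then false
      else true
    let st := (PySem.List.pyRange 1 (lenX + 1) 1).foldl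
      (fun (p : List Int × Bool) i =>
        let v := min (min (PySem.List.pyGetD p.1 (i - 1) 0 + 1)
                          (PySem.List.pyGetD vAnt i 0 + 1))
                     (PySem.List.pyGetD vAnt (i - 1) 0 +
                       (if PySem.List.pyGetD x (i - 1) ' ' ≠ PySem.List.pyGetD y (j - 1) ' '
                        then 1 else 0))
        let vAct' := PySem.List.pySetD p.1 i v
        let parada :=
          if PySem.List.pyGetD vAct' i 0 < threshold then false
          else if PySem.List.pyGetD vAct' i 0 = threshold ∧ lenX - i = lenY - j then false
          else p.2
        (vAct', parada))
      (vAct1, parada0)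
    if st.2 then threshold + 1
    else pvLevARows x y threshold js st.1 vAnt   -- swap: vAct, vAnt = vAnt, vAct

def pvLevA (x : List Char) (y : List Char) (threshold : Int) : Int :=
  let lenX := x.length
  let vAnt0 : List Int := List.replicate (lenX + 1) 0
  let vAct0 : List Int := List.replicate (lenX + 1) 0
  let vAnt := (PySem.List.pyRange 1 ((lenX : Int) + 1) 1).foldl
    (fun v i => PySem.List.pySetD v i (PySem.List.pyGetD v (i - 1) 0 + 1)) vAnt0
  pvLevARows x y threshold (PySem.List.pyRange 1 ((y.length : Int) + 1) 1) vAnt vAct0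

def levenshtein_cota_optimista (x : String) (y : String) (threshold : Int) : Int :=
  let xl := x.toList
  let yl := y.toList
  let dic : PySem.Set Char := PySem.Set.union (PySem.Set.ofList xl) (PySem.Set.ofList yl)
  let res : PySem.Dict Int Int := dic.foldl
    (fun r letra =>
      let dif : Int := (PySem.List.count xl letra : Int) - (PySem.List.count yl letra : Int)
      if dif < 0 then r.modify 1 0 (· + |dif|)
      else r.modify (-1) 0 (· + |dif|))
    (PySem.Dict.ofList [(1, 0), (-1, 0)])
  let res2 := max (res.getD 1 0) (res.getD (-1) 0)
  if res2 > threshold then threshold + 1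
  else pvLevA xl yl threshold

-- ===== PORT B =====
-- B's inner comprehension `for cx, p0, p1 in zip(x, prev, prev[1:])`: structural recursion,
-- carrying `new[-1]` as `last`.
def pvLevBRow (cy : Char) : List (Char × Int × Int) → Int → List Int
  | [], _ => []
  | (cx, p0, p1) :: rest, last =>
    let v := min (min (last + 1) (p1 + 1)) (p0 + (if cx ≠ cy then 1 else 0))
    v :: pvLevBRow cy rest v

-- one body of B's `for cy in y` loop: the next full row built from the previous one
def pvNextRow (x : List Char) (cy : Char) (prev : List Int) : List Int :=
  let h := PySem.List.pyGetD prev 0 0 + 1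
  h :: pvLevBRow cy (x.zip (prev.zip prev.tail)) h

-- B's matrix-building pass: `rows.append(new)` for each cy, prev = rows[-1]
def pvRowsFrom (x : List Char) : List Char → List Int → List (List Int)
  | [], _ => []
  | cy :: rest, prev =>
    let new := pvNextRow x cy prev
    new :: pvRowsFrom x rest new

-- B's pure predicate `row_ok(row, j, n, m, threshold)`
def pvRowOk (n m : Nat) (t : Int) (j : Int) (row : List Int) : Bool :=
  decide (PySem.List.pyGetD row 0 0 ≤ t) ||
  (PySem.List.enumerate (PySem.List.slice row (some 1) none) 1).any
    (fun p => p.2 < t || (p.2 == t && ((n : Int) - p.1 == (m : Int) - j)))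

-- B's `levenshtein`: build ALL rows, then scan `rows[1:]` with row_ok, else rows[-1][n]
def pvLevB (x : List Char) (y : List Char) (t : Int) : Int :=
  let n := x.length
  let row0 := PySem.List.pyRange 0 ((n : Int) + 1) 1
  let rows := row0 :: pvRowsFrom x y row0
  if (PySem.List.enumerate (PySem.List.slice rows (some 1) none) 1).any
      (fun p => !pvRowOk n y.length t p.1 p.2)
  then t + 1
  else PySem.List.pyGetD (PySem.List.pyGetD rows (-1) []) (n : Int) 0

def levenshtein_cota_optimista_alt (x : String) (y : String) (threshold : Int) : Int :=
  let xl := x.toList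
  let yl := y.toList
  let cnt : PySem.Dict Char Int :=
    yl.foldl (fun d c => d.modify c 0 (· - 1))
      (xl.foldl (fun d c => d.modify c 0 (· + 1)) PySem.Dict.empty)
  let s : Int := (cnt.values.map (fun v => |v|)).sum
  let res := PySem.Int.floordiv (s + |(xl.length : Int) - (yl.length : Int)|) 2
  if res > threshold then threshold + 1
  else pvLevB xl yl threshold

-- ===== PRECONDITION & SPEC =====
def Spec_levenshtein_cota_optimista (x : String) (y : String) (threshold : Int) (out : Int) : Prop := out = levenshtein_cota_optimista_alt x y threshold
instance (x : String) (y : String) (threshold : Int) (out : Int) : Decidable (Spec_levenshtein_cota_optimista x y threshold out) := by unfold Spec_levenshtein_cota_optimista; infer_instance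

-- ===== CLAIM (what is proved, stated in full; the proofs are below) =====
def Claim_equal_levenshtein_cota_optimista : Prop := ∀ (x : String) (y : String) (threshold : Int), Dom_levenshtein_cota_optimista x y threshold → Spec_levenshtein_cota_optimista x y threshold (levenshtein_cota_optimista x y threshold)

-- ===== LEMMAS AND PROOFS =====

def pvD (xl yl : List Char) (c : Char) : Int :=
  (PySem.List.count xl c : Int) - (PySem.List.count yl c : Int)

theorem pvA_fold_bound (xl yl : List Char) (L : List Char) (r : PySem.Dict Int Int) :
    ((L.foldl (fun r letra =>
      let dif : Int := (PySem.List.count xl letra : Int) - (PySem.List.count yl letra : Int)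
      if dif < 0 then r.modify 1 0 (· + |dif|)
      else r.modify (-1) 0 (· + |dif|)) r).getD 1 0
        = r.getD 1 0 + (L.map (fun c => if pvD xl yl c < 0 then |pvD xl yl c| else 0)).sum)
    ∧ ((L.foldl (fun r letra =>
      let dif : Int := (PySem.List.count xl letra : Int) - (PySem.List.count yl letra : Int)
      if dif < 0 then r.modify 1 0 (· + |dif|)
      else r.modify (-1) 0 (· + |dif|)) r).getD (-1) 0
        = r.getD (-1) 0 + (L.map (fun c => if pvD xl yl c < 0 then 0 else |pvD xl yl c|)).sum) := by
  induction L generalizing r with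
  | nil => simp
  | cons a L ih =>
    simp only [List.foldl_cons, List.map_cons, List.sum_cons]
    by_cases hd : pvD xl yl a < 0
    · have hd' : ((PySem.List.count xl a : Int) - (PySem.List.count yl a : Int)) < 0 := hd
      simp only [hd', if_pos, pvD]
      rw [(ih _).1, (ih _).2]
      rw [PySem.Dict.getD_modify_self, PySem.Dict.getD_modify_of_ne _ _ _ (by decide)]
      constructor <;> · simp only [pvD]; ring
    · have hd' : ¬ (((PySem.List.count xl a : Int) - (PySem.List.count yl a : Int)) < 0) := hd
      simp only [hd', pvD, if_false]
      rw [(ih _).1, (ih _).2]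
      rw [PySem.Dict.getD_modify_self, PySem.Dict.getD_modify_of_ne _ _ _ (by decide)]
      constructor <;> · simp only [pvD]; ring

theorem pvB_getD_sub (l : List Char) (d : PySem.Dict Char Int) (v : Char) :
    (l.foldl (fun d c => d.modify c 0 (· - 1)) d).getD v 0 = d.getD v 0 - l.count v := by
  induction l generalizing d with
  | nil => simp
  | cons a l ih =>
    simp only [List.foldl_cons]
    rw [ih, PySem.Dict.getD_modify, List.count_cons]
    by_cases h : v = a
    · subst h; simp; ring
    · simp only [beq_iff_eq, h, if_false]
      simp [Ne.symm h]

theorem pv_sum_count (K : List Char) (l : List Char) (hnd : K.Nodup)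
    (hsub : ∀ c ∈ l, c ∈ K) :
    (K.map (fun c => (PySem.List.count l c : Int))).sum = l.length := by
  induction l with
  | nil => simp [PySem.List.count]
  | cons a l ih =>
    have ha : a ∈ K := hsub a (by simp)
    have h1 : (K.map (fun c => (PySem.List.count (a :: l) c : Int)))
        = (K.map (fun c => (PySem.List.count l c : Int) + if (a == c) = true then 1 else 0)) := by
      apply List.map_congr_left
      intro c _
      simp only [PySem.List.count_eq, List.count_cons]
      push_cast
      split <;> simp
    rw [h1, PySem.List.sum_map_add_int, ih (fun c hc => hsub c (by simp [hc]))]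
    have h2 : (K.map (fun c => if (a == c) = true then (1:Int) else 0)).sum
        = (K.countP (fun c => a == c) : Int) := PySem.List.sum_map_ite_one_zero _ _
    have h3 : K.countP (fun c => a == c) = K.count a := by
      rw [List.count]
      congr 1
      funext c
      simp [eq_comm]
    rw [h2, h3, List.count_eq_one_of_mem hnd ha]
    simp only [List.length_cons]
    push_cast
    ring

theorem pv_max_floordiv (P N : Int) (_hP : 0 ≤ P) (_hN : 0 ≤ N) :
    max N P = PySem.Int.floordiv ((P + N) + |P - N|) 2 := by
  rcases le_total N P with h | h
  · rw [abs_of_nonneg (by omega), max_eq_right h]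
    have : P + N + (P - N) = 2 * P := by ring
    rw [this, PySem.Int.floordiv_eq_ediv_of_pos (by norm_num)]
    exact (Int.mul_ediv_cancel_left _ (by norm_num)).symm
  · rw [abs_of_nonpos (by omega), max_eq_left h]
    have : P + N + -(P - N) = 2 * N := by ring
    rw [this, PySem.Int.floordiv_eq_ediv_of_pos (by norm_num)]
    exact (Int.mul_ediv_cancel_left _ (by norm_num)).symm

theorem pv_update_ofList {α : Type} [BEq α] [LawfulBEq α] (s : PySem.Set α) (ys : List α) :
    PySem.Set.update s (PySem.Set.ofList ys) = PySem.Set.update s ys := by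
  rw [PySem.Set.update_eq_append_filter, PySem.Set.update_eq_append_filter,
    PySem.Set.ofList_ofList]

theorem pv_sum_map_sub (K : List Char) (f g : Char → Int) :
    (K.map (fun c => f c - g c)).sum = (K.map f).sum - (K.map g).sum := by
  induction K with
  | nil => simp
  | cons a t ih => simp only [List.map_cons, List.sum_cons, ih]; ring

-- the two bound computations agree
theorem pv_bound_eq (xl yl : List Char) :
    max (((PySem.Set.union (PySem.Set.ofList xl) (PySem.Set.ofList yl)).foldl
      (fun r letra =>
        let dif : Int := (PySem.List.count xl letra : Int) - (PySem.List.count yl letra : Int)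
        if dif < 0 then r.modify 1 0 (· + |dif|)
        else r.modify (-1) 0 (· + |dif|))
      (PySem.Dict.ofList [(1, 0), (-1, 0)])).getD 1 0)
      (((PySem.Set.union (PySem.Set.ofList xl) (PySem.Set.ofList yl)).foldl
      (fun r letra =>
        let dif : Int := (PySem.List.count xl letra : Int) - (PySem.List.count yl letra : Int)
        if dif < 0 then r.modify 1 0 (· + |dif|)
        else r.modify (-1) 0 (· + |dif|))
      (PySem.Dict.ofList [(1, 0), (-1, 0)])).getD (-1) 0)
    = PySem.Int.floordiv
        (((yl.foldl (fun d c => d.modify c 0 (· - 1))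
            (xl.foldl (fun d c => d.modify c 0 (· + 1))
              (PySem.Dict.empty : PySem.Dict Char Int))).values.map
              (fun v => |v|)).sum
          + |(xl.length : Int) - (yl.length : Int)|) 2 := by
  set K : List Char := PySem.Set.ofList (xl ++ yl) with hK
  have hKnd : K.Nodup := PySem.Set.nodup_ofList _
  have hdic : PySem.Set.union (PySem.Set.ofList xl) (PySem.Set.ofList yl) = K := by
    rw [PySem.Set.union_eq_update, pv_update_ofList, hK, PySem.Set.ofList_append]
  set cnt := yl.foldl (fun d c => d.modify c 0 (· - 1))
      (xl.foldl (fun d c => d.modify c 0 (· + 1))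
        (PySem.Dict.empty : PySem.Dict Char Int)) with hcnt
  have hkeys : cnt.keys = K := by
    rw [hcnt, PySem.Dict.keys_foldl_modify, PySem.Dict.keys_foldl_modify]
    rw [PySem.Dict.keys_empty, PySem.Set.update_nil_left, hK, PySem.Set.ofList_append]
  have hget : ∀ c, cnt.getD c 0 = pvD xl yl c := by
    intro c
    rw [hcnt, pvB_getD_sub, PySem.Dict.getD_foldl_modify_add_one]
    simp [pvD, PySem.List.count_eq]
  have hvals : cnt.values = K.map (fun c => cnt.getD c 0) := by
    rw [← hkeys]
    exact PySem.Dict.values_eq_map_keys cnt (hkeys ▸ hKnd) 0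
  have hS : (cnt.values.map (fun v => |v|)).sum
      = (K.map (fun c => |pvD xl yl c|)).sum := by
    rw [hvals, List.map_map]
    congr 1
    apply List.map_congr_left
    intro c _
    simp [hget c]
  have hA := pvA_fold_bound xl yl K (PySem.Dict.ofList [(1, 0), (-1, 0)])
  set N : Int := (K.map (fun c => if pvD xl yl c < 0 then |pvD xl yl c| else 0)).sum with hN
  set P : Int := (K.map (fun c => if pvD xl yl c < 0 then 0 else |pvD xl yl c|)).sum with hP
  have hN0 : 0 ≤ N := by
    apply List.sum_nonneg; intro z hz
    simp only [List.mem_map] at hz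
    obtain ⟨c, _, rfl⟩ := hz
    split <;> simp [abs_nonneg]
  have hP0 : 0 ≤ P := by
    apply List.sum_nonneg; intro z hz
    simp only [List.mem_map] at hz
    obtain ⟨c, _, rfl⟩ := hz
    split <;> simp [abs_nonneg]
  have hSsum : (K.map (fun c => |pvD xl yl c|)).sum = P + N := by
    rw [hP, hN, ← PySem.List.sum_map_add_int]
    congr 1
    apply List.map_congr_left
    intro c _
    split <;> simp
  have hDsum : (K.map (fun c => pvD xl yl c)).sum = P - N := by
    rw [hP, hN, ← pv_sum_map_sub]
    congr 1
    apply List.map_congr_left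
    intro c _
    split_ifs with h
    · rw [abs_of_neg h]; ring
    · rw [abs_of_nonneg (by omega)]; ring
  have hDlen : (K.map (fun c => pvD xl yl c)).sum
      = (xl.length : Int) - (yl.length : Int) := by
    have hx := pv_sum_count K xl hKnd (fun c hc => by
      rw [hK]; simp [PySem.Set.mem_ofList, hc])
    have hy := pv_sum_count K yl hKnd (fun c hc => by
      rw [hK]; simp [PySem.Set.mem_ofList, hc])
    calc (K.map (fun c => pvD xl yl c)).sum
        = (K.map (fun c => (PySem.List.count xl c : Int))).sum
          - (K.map (fun c => (PySem.List.count yl c : Int))).sum := pv_sum_map_sub K _ _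
      _ = _ := by rw [hx, hy]
  rw [hdic, hA.1, hA.2, hS, hSsum]
  have hgd1 : (PySem.Dict.ofList ([(1, 0), (-1, 0)] : List (Int × Int))).getD 1 0 = 0 := by decide
  have hgdm : (PySem.Dict.ofList ([(1, 0), (-1, 0)] : List (Int × Int))).getD (-1) 0 = 0 := by decide
  rw [hgd1, hgdm, zero_add, zero_add]
  rw [← hDlen, hDsum]
  exact pv_max_floordiv P N hP0 hN0

-- proof-only helper: A's row loop rephrased as a recursion over enumerate(y, 1) that
-- consumes one row at a time (the stepping stone between A's fused loop and B's stages)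
def pvLevBGo (x : List Char) (leny : Nat) (threshold : Int) :
    List (Int × Char) → List Int → Int
  | [], row => PySem.List.pyGetD row (x.length : Int) 0
  | (j, cy) :: rest, row =>
    let h := PySem.List.pyGetD row 0 0 + 1
    let new := h :: pvLevBRow cy (x.zip (row.zip row.tail)) h
    let ok := (h ≤ threshold) ||
      (PySem.List.enumerate (PySem.List.slice new (some 1) none) 1).any
        (fun p => p.2 < threshold ||
          (p.2 == threshold && ((x.length : Int) - p.1 == (leny : Int) - j)))
    if !ok then threshold + 1
    else pvLevBGo x leny threshold rest new

theorem pvLevBRow_length (cy : Char) (ts : List (Char × Int × Int)) (last : Int) :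
    (pvLevBRow cy ts last).length = ts.length := by
  induction ts generalizing last with
  | nil => rfl
  | cons t rest ih =>
    obtain ⟨cx, p0, p1⟩ := t
    simp [pvLevBRow, ih]

theorem pvLevBRow_getElem (cy : Char) (ts : List (Char × Int × Int)) (last : Int)
    (i : Nat) (h : i < ts.length)
    (h2 : i + 1 < (last :: pvLevBRow cy ts last).length)
    (h1 : i < (last :: pvLevBRow cy ts last).length) :
    (last :: pvLevBRow cy ts last)[i + 1] =
      min (min ((last :: pvLevBRow cy ts last)[i] + 1) ((ts[i]).2.2 + 1))
        ((ts[i]).2.1 + (if (ts[i]).1 ≠ cy then 1 else 0)) := by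
  induction ts generalizing last i with
  | nil => simp at h
  | cons t rest ih =>
    obtain ⟨cx, p0, p1⟩ := t
    match i with
    | 0 => simp only [pvLevBRow, List.getElem_cons_succ, List.getElem_cons_zero]; rfl
    | (k+1) =>
      have hk : k < rest.length := by simpa using h
      have := ih (min (min (last + 1) (p1 + 1)) (p0 + (if cx ≠ cy then 1 else 0))) k hk
        (by simp [pvLevBRow] at h2 ⊢; omega) (by simp [pvLevBRow] at h1 ⊢; omega)
      simp only [pvLevBRow, List.getElem_cons_succ]
      exact this

theorem pv_getD_left (a b : List Int) (k : Nat) (hk : k < a.length) :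
    (a ++ b).getD k 0 = a[k] := by
  rw [List.getD_eq_getElem?_getD, List.getElem?_append_left hk, List.getElem?_eq_getElem hk]
  rfl

theorem pv_set_append (a b : List Int) (v : Int) :
    (a ++ b).set a.length v = a ++ b.set 0 v := by
  rw [List.set_append]
  simp

theorem pv_set_append' (a b : List Int) (i : Nat) (v : Int) (h : i = a.length) :
    (a ++ b).set i v = a ++ b.set 0 v := by
  subst h
  exact pv_set_append a b v

-- the fresh row built by B, with its index recurrence over the previous row
theorem pv_new_length (x : List Char) (prev : List Int) (cy : Char) (h0 : Int)
    (hprev : prev.length = x.length + 1) :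
    (h0 :: pvLevBRow cy (x.zip (prev.zip prev.tail)) h0).length = x.length + 1 := by
  simp [pvLevBRow_length, hprev]

theorem pv_new_getElem (x : List Char) (prev : List Int) (cy : Char) (h0 : Int)
    (hprev : prev.length = x.length + 1) (k : Nat) (hk : k < x.length)
    (ha : k + 1 < (h0 :: pvLevBRow cy (x.zip (prev.zip prev.tail)) h0).length)
    (hb : k < (h0 :: pvLevBRow cy (x.zip (prev.zip prev.tail)) h0).length)
    (hc : k < prev.length) (hd : k + 1 < prev.length) (he : k < x.length) :
    (h0 :: pvLevBRow cy (x.zip (prev.zip prev.tail)) h0)[k + 1] =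
      min (min ((h0 :: pvLevBRow cy (x.zip (prev.zip prev.tail)) h0)[k] + 1) (prev[k + 1] + 1))
        (prev[k] + (if x[k] ≠ cy then 1 else 0)) := by
  have hts : (x.zip (prev.zip prev.tail)).length = x.length := by
    simp [hprev]
  have hkts : k < (x.zip (prev.zip prev.tail)).length := by omega
  have := pvLevBRow_getElem cy (x.zip (prev.zip prev.tail)) h0 k hkts
    (by simpa [hts] using ha) (by simpa [hts] using hb)
  rw [this]
  have h1 : (x.zip (prev.zip prev.tail))[k] = (x[k], prev[k], prev[k+1]) := by
    rw [List.getElem_zip, List.getElem_zip, List.getElem_tail]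
  rw [h1]

-- A's first-column initialisation builds [0, 1, …, k] in place
theorem pv_init (n : Nat) (k : Nat) (hk : k ≤ n) :
    (PySem.List.pyRange 1 ((k : Int) + 1) 1).foldl
      (fun v i => PySem.List.pySetD v i (PySem.List.pyGetD v (i - 1) 0 + 1))
      (List.replicate (n + 1) (0 : Int))
    = PySem.List.pyRange 0 ((k : Int) + 1) 1 ++ List.replicate (n - k) (0 : Int) := by
  induction k with
  | zero =>
    rw [show ((0:Nat) : Int) + 1 = 1 by norm_num, PySem.List.pyRange_one_eq_nil (by norm_num)]
    simp only [List.foldl_nil]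
    have h1 : PySem.List.pyRange 0 1 1 = [0] := by
      have := PySem.List.pyRange_one_singleton (a := 0)
      simpa using this
    rw [h1]
    simp [List.replicate_succ]
  | succ k ih =>
    have hk' : k ≤ n := by omega
    have hsplit : PySem.List.pyRange 1 (((k+1 : Nat) : Int) + 1) 1
        = PySem.List.pyRange 1 ((k : Int) + 1) 1 ++ [(k : Int) + 1] := by
      have := PySem.List.pyRange_one_succ_right (show (1:Int) ≤ (k : Int) + 1 by omega)
      push_cast
      rw [← this]
    rw [hsplit, List.foldl_append, ih hk']
    simp only [List.foldl_cons, List.foldl_nil]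
    have hlen : (PySem.List.pyRange 0 ((k : Int) + 1) 1).length = k + 1 := by
      rw [PySem.List.length_pyRange_one]
      omega
    have hgd : PySem.List.pyGetD
        (PySem.List.pyRange 0 ((k : Int) + 1) 1 ++ List.replicate (n - k) (0:Int))
        (((k : Int) + 1) - 1) 0 = (k : Int) := by
      have : ((k : Int) + 1) - 1 = ((k : Nat) : Int) := by ring
      rw [this, PySem.List.pyGetD_natCast]
      rw [pv_getD_left _ _ k (by omega)]
      simp [PySem.List.getElem_pyRange_one]
    rw [hgd]
    have hset : PySem.List.pySetD
        (PySem.List.pyRange 0 ((k : Int) + 1) 1 ++ List.replicate (n - k) (0:Int))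
        ((k : Int) + 1) ((k : Int) + 1)
        = PySem.List.pyRange 0 (((k+1 : Nat) : Int) + 1) 1 ++ List.replicate (n - (k+1)) (0:Int) := by
      set L := PySem.List.pyRange 0 ((k : Int) + 1) 1 with hL
      have hc : ((k : Int) + 1) = (((k+1 : Nat)) : Int) := by push_cast; ring
      rw [hc, PySem.List.pySetD_natCast]
      have hrep : List.replicate (n - k) (0:Int) = 0 :: List.replicate (n - (k+1)) (0:Int) := by
        have : n - k = 1 + (n - (k+1)) := by omega
        rw [this, List.replicate_add]
        rfl
      rw [pv_set_append' _ _ _ _ (by rw [hlen]), hrep]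
      have : PySem.List.pyRange 0 (((k+1 : Nat) : Int) + 1) 1
          = PySem.List.pyRange 0 ((k : Int) + 1) 1 ++ [(k : Int) + 1] := by
        have := PySem.List.pyRange_one_succ_right (show (0:Int) ≤ (k : Int) + 1 by omega)
        push_cast
        rw [← this]
      rw [this]
      simp [hL]
    rw [hset]

theorem pv_getD_nat {α : Type} (l : List α) (d : α) (k : Nat) (h : k < l.length) :
    l.getD k d = l[k] := by
  rw [List.getD_eq_getElem?_getD, List.getElem?_eq_getElem h]
  rfl

-- A's inner column loop computes exactly B's fresh row, and A's running stop flag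
-- is B's post-scan of that row
theorem pv_inner (x : List Char) (cy : Char) (t lenX lenY jv : Int)
    (prev vAct0 : List Int)
    (hprev : prev.length = x.length + 1) (hv0 : vAct0.length = x.length + 1)
    (parada0 : Bool) (k : Nat) (hk : k ≤ x.length) :
    (PySem.List.pyRange 1 ((k : Int) + 1) 1).foldl
      (fun (p : List Int × Bool) i =>
        let v := min (min (PySem.List.pyGetD p.1 (i - 1) 0 + 1)
                          (PySem.List.pyGetD prev i 0 + 1))
                     (PySem.List.pyGetD prev (i - 1) 0 +
                       (if PySem.List.pyGetD x (i - 1) ' ' ≠ cy then 1 else 0))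
        let vAct' := PySem.List.pySetD p.1 i v
        let parada :=
          if PySem.List.pyGetD vAct' i 0 < t then false
          else if PySem.List.pyGetD vAct' i 0 = t ∧ lenX - i = lenY - jv then false
          else p.2
        (vAct', parada))
      (PySem.List.pySetD vAct0 0 (PySem.List.pyGetD prev 0 0 + 1), parada0)
    = (((PySem.List.pyGetD prev 0 0 + 1) ::
          pvLevBRow cy (x.zip (prev.zip prev.tail)) (PySem.List.pyGetD prev 0 0 + 1)).take (k+1)
          ++ (PySem.List.pySetD vAct0 0 (PySem.List.pyGetD prev 0 0 + 1)).drop (k+1),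
       parada0 && !((PySem.List.enumerate
          (((PySem.List.pyGetD prev 0 0 + 1) ::
            pvLevBRow cy (x.zip (prev.zip prev.tail)) (PySem.List.pyGetD prev 0 0 + 1)).tail.take k) 1).any
          (fun p => p.2 < t || (p.2 == t && lenX - p.1 == lenY - jv)))) := by
  set h0 : Int := PySem.List.pyGetD prev 0 0 + 1 with hh0
  set new : List Int := h0 :: pvLevBRow cy (x.zip (prev.zip prev.tail)) h0 with hnew
  have hnewlen : new.length = x.length + 1 := pv_new_length x prev cy h0 hprev
  set vAct1 : List Int := PySem.List.pySetD vAct0 0 h0 with hvAct1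
  have hv1 : vAct1 = vAct0.set 0 h0 := by
    rw [hvAct1]
    simp [pysem]
  have hv1len : vAct1.length = x.length + 1 := by rw [hv1]; simpa using hv0
  induction k with
  | zero =>
    rw [show ((0:Nat) : Int) + 1 = 1 by norm_num, PySem.List.pyRange_one_eq_nil (by norm_num)]
    simp only [List.foldl_nil]
    have h1 : new.take 1 ++ vAct1.drop 1 = vAct1 := by
      cases hva : vAct0 with
      | nil => rw [hva] at hv0; simp at hv0
      | cons a rest =>
        have hce : vAct1 = h0 :: rest := by rw [hv1, hva]; rfl
        rw [hce, hnew]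
        simp
    rw [h1]
    simp
  | succ k ih =>
    have hk' : k ≤ x.length := by omega
    have hkx : k < x.length := by omega
    have hsplit : PySem.List.pyRange 1 (((k+1 : Nat) : Int) + 1) 1
        = PySem.List.pyRange 1 ((k : Int) + 1) 1 ++ [(k : Int) + 1] := by
      have := PySem.List.pyRange_one_succ_right (show (1:Int) ≤ (k : Int) + 1 by omega)
      push_cast
      rw [← this]
    rw [hsplit, List.foldl_append, ih hk']
    simp only [List.foldl_cons, List.foldl_nil]
    -- the state before step i = k+1
    set Lk : List Int := new.take (k+1) ++ vAct1.drop (k+1) with hLk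
    have hLklen : Lk.length = x.length + 1 := by
      rw [hLk]
      simp [hnewlen, hv1len]
      omega
    -- the four reads
    have hr1 : PySem.List.pyGetD Lk (((k : Int) + 1) - 1) 0 = new[k] := by
      have : ((k : Int) + 1) - 1 = ((k : Nat) : Int) := by ring
      rw [this, PySem.List.pyGetD_natCast, hLk, pv_getD_left _ _ k (by simp [hnewlen]; omega)]
      rw [List.getElem_take]
    have hr2 : PySem.List.pyGetD prev ((k : Int) + 1) 0 = prev[k+1] := by
      rw [show (k : Int) + 1 = ((k+1 : Nat) : Int) by push_cast; ring, PySem.List.pyGetD_natCast]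
      exact pv_getD_nat prev 0 (k+1) (by omega)
    have hr3 : PySem.List.pyGetD prev (((k : Int) + 1) - 1) 0 = prev[k] := by
      rw [show ((k : Int) + 1) - 1 = ((k : Nat) : Int) by ring, PySem.List.pyGetD_natCast]
      exact pv_getD_nat prev 0 k (by omega)
    have hr4 : PySem.List.pyGetD x (((k : Int) + 1) - 1) ' ' = x[k] := by
      rw [show ((k : Int) + 1) - 1 = ((k : Nat) : Int) by ring, PySem.List.pyGetD_natCast]
      exact pv_getD_nat x ' ' k hkx
    rw [hr1, hr2, hr3, hr4]
    -- the written value is B's next cell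
    have hval : min (min (new[k] + 1) (prev[k+1] + 1)) (prev[k] + (if x[k] ≠ cy then 1 else 0))
        = new[k+1]'(by omega) := by
      exact (pv_new_getElem x prev cy h0 hprev k hkx
        (by rw [← hnew]; omega) (by rw [← hnew]; omega) (by omega) (by omega) hkx).symm
    rw [hval]
    -- the write extends the correct prefix
    have hset : PySem.List.pySetD Lk ((k : Int) + 1) (new[k+1]'(by omega))
        = new.take (k+2) ++ vAct1.drop (k+2) := by
      rw [show (k : Int) + 1 = ((k+1 : Nat) : Int) by push_cast; ring, PySem.List.pySetD_natCast]
      rw [hLk, pv_set_append' _ _ _ _ (by simp [hnewlen]; omega)]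
      have hd : vAct1.drop (k+1) = vAct1[k+1]'(by omega) :: vAct1.drop (k+2) :=
        List.drop_eq_getElem_cons (by omega)
      rw [hd]
      simp only [List.set_cons_zero]
      rw [show k + 2 = (k+1) + 1 by omega]
      rw [List.append_cons, ← List.take_succ_eq_append_getElem (show k+1 < new.length by omega)]
    rw [hset]
    -- the flag reads the written cell
    have hflagread : PySem.List.pyGetD (new.take (k+2) ++ vAct1.drop (k+2)) ((k : Int) + 1) 0
        = new[k+1]'(by omega) := by
      rw [show (k : Int) + 1 = ((k+1 : Nat) : Int) by push_cast; ring, PySem.List.pyGetD_natCast]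
      rw [pv_getD_left _ _ (k+1) (by simp [hnewlen]; omega)]
      rw [List.getElem_take]
    rw [hflagread]
    -- the stop-flag scan gains exactly the new cell
    have htail : new.tail.take (k+1) = new.tail.take k ++ [new[k+1]'(by omega)] := by
      have hlt : k < new.tail.length := by simp [hnewlen]; omega
      rw [List.take_succ_eq_append_getElem hlt]
      simp [List.getElem_tail]
    have hen : (PySem.List.enumerate (new.tail.take (k+1)) 1)
        = (PySem.List.enumerate (new.tail.take k) 1) ++ [((1 : Int) + k, new[k+1]'(by omega))] := by
      rw [htail, PySem.List.enumerate_append]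
      have hlen2 : (new.tail.take k).length = k := by simp [hnewlen]; omega
      rw [hlen2]
      rfl
    rw [hen, List.any_append]
    -- boolean bookkeeping
    cases hF : (PySem.List.enumerate (new.tail.take k) 1).any
        (fun p => p.2 < t || (p.2 == t && lenX - p.1 == lenY - jv)) with
    | true => simp
    | false =>
      simp only [List.any_cons, List.any_nil, Bool.or_false, Bool.false_or]
      by_cases h1 : new[k+1]'(by omega) < t
      · simp [h1]
      · by_cases h2 : new[k+1]'(by omega) = t ∧ lenX - ((k : Int) + 1) = lenY - jv
        · have : (lenX - (1 + (k:Int)) == lenY - jv) = true := by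
            simp; omega
          simp [h2, this]
        · have hcond : ((new[k+1]'(by omega)) < t
              || ((new[k+1]'(by omega)) == t && lenX - (1 + (k:Int)) == lenY - jv)) = false := by
            simp only [Bool.or_eq_false_iff]
            constructor
            · simpa using h1
            · rcases Classical.em ((new[k+1]'(by omega)) = t) with he | he
              · simp only [he, beq_self_eq_true, Bool.true_and]
                have : ¬ (lenX - ((k : Int) + 1) = lenY - jv) := fun hc => h2 ⟨he, hc⟩
                simp; omega
              · simp [he]
          simp only [h1, if_false, h2, if_false]
          simp
          intro _
          rcases Classical.em ((new[k+1]'(by omega)) = t) with he | he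
          · right; intro hc; exact h2 ⟨he, by omega⟩
          · left; exact he

-- A's row loop with swap ≡ the row-at-a-time recursion pvLevBGo
theorem pv_outer (x y : List Char) (t : Int) (m : Nat) (hm : m ≤ y.length)
    (prev vAct0 : List Int)
    (hprev : prev.length = x.length + 1) (hv0 : vAct0.length = x.length + 1) :
    pvLevARows x y t (PySem.List.pyRange ((m : Int) + 1) ((y.length : Int) + 1) 1) prev vAct0
      = pvLevBGo x y.length t (PySem.List.enumerate (y.drop m) ((m : Int) + 1)) prev := by
  induction hn : y.length - m generalizing m prev vAct0 with
  | zero =>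
    have hme : m = y.length := by omega
    subst hme
    rw [PySem.List.pyRange_one_eq_nil (by omega), List.drop_length]
    rfl
  | succ n ihn =>
    have hmlt : m < y.length := by omega
    -- expand A's range and the enumerate by one step
    rw [PySem.List.pyRange_one_cons (by omega)]
    rw [List.drop_eq_getElem_cons hmlt]
    rw [PySem.List.enumerate_cons]
    -- the y-character A reads is cy = y[m]
    have hcy : PySem.List.pyGetD y (((m : Int) + 1) - 1) ' ' = y[m] := by
      rw [show ((m : Int) + 1) - 1 = ((m : Nat) : Int) by ring, PySem.List.pyGetD_natCast]
      exact pv_getD_nat y ' ' m hmlt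
    simp only [pvLevARows, pvLevBGo, hcy]
    -- abbreviations
    set vAct1 : List Int := PySem.List.pySetD vAct0 0 (PySem.List.pyGetD prev 0 0 + 1) with hvAct1
    set parada0 : Bool :=
      (if PySem.List.pyGetD vAct1 0 0 ≤ t then false
       else if PySem.List.pyGetD vAct1 0 0 = t ∧
          (x.length : Int) - (x.length : Int) = (y.length : Int) - ((m : Int) + 1) then false
       else true) with hpar0
    rw [pv_inner x (y[m]) t (x.length : Int) (y.length : Int) ((m : Int) + 1)
      prev vAct0 hprev hv0 parada0 x.length (le_refl _)]
    set h0 : Int := PySem.List.pyGetD prev 0 0 + 1 with hh0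
    set new : List Int := h0 :: pvLevBRow y[m] (x.zip (prev.zip prev.tail)) h0 with hnew
    have hnewlen : new.length = x.length + 1 := pv_new_length x prev (y[m]) h0 hprev
    have hv1len : vAct1.length = x.length + 1 := by
      rw [hvAct1, PySem.List.length_pySetD]
      exact hv0
    have htake : new.take (x.length + 1) = new := List.take_of_length_le (by omega)
    have hdrop : vAct1.drop (x.length + 1) = [] := by
      apply List.drop_eq_nil_of_le
      omega
    have hslice : PySem.List.slice new (some 1) none = new.tail :=
      PySem.List.slice_from_one new
    have htt : new.tail.take x.length = new.tail :=
      List.take_of_length_le (by simp [hnewlen])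
    have hread0 : PySem.List.pyGetD vAct1 0 0 = h0 := by
      rw [hvAct1]
      cases vAct0 with
      | nil => simp at hv0
      | cons a r => simp [pysem]
    have hpar : parada0 = !(decide (h0 ≤ t)) := by
      rw [hpar0, hread0]
      split_ifs with a b
      · simp [a]
      · exfalso
        omega
      · simp [a]
    simp only [htake, ← hvAct1, hdrop, htt, hslice, List.append_nil, hpar, Bool.not_or]
    set b : Bool := (PySem.List.enumerate new.tail 1).any
        (fun p => decide (p.2 < t) || (p.2 == t && ↑x.length - p.1 == ↑y.length - ((m : Int) + 1))) with hb
    by_cases hc : (!decide (h0 ≤ t) && !b) = true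
    · simp only [hc]
      rfl
    · rw [if_neg hc, if_neg hc]
      have hih := ihn (m+1) (by omega) new prev hnewlen hprev (by omega)
      rw [show ((m : Int) + 1) + 1 = (((m+1 : Nat)) : Int) + 1 by push_cast; ring]
      exact hih

theorem pv_getLast_cons {α : Type} (a : α) (l : List α) (h : a :: l ≠ []) :
    (a :: l).getLast h = l.getLastD a := by
  induction l generalizing a with
  | nil => rfl
  | cons b l ih =>
    rw [List.getLast_cons (by simp), ih, List.getLastD_cons]

-- the row-at-a-time recursion ≡ B's staged passes (build all rows, then scan)
theorem pvBGo_eq (x : List Char) (leny : Nat) (t : Int) (rest : List Char) (m : Nat)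
    (prev : List Int) :
    pvLevBGo x leny t (PySem.List.enumerate rest ((m : Int) + 1)) prev =
      if (PySem.List.enumerate (pvRowsFrom x rest prev) ((m : Int) + 1)).any
          (fun p => !pvRowOk x.length leny t p.1 p.2)
      then t + 1
      else PySem.List.pyGetD ((pvRowsFrom x rest prev).getLastD prev) (x.length : Int) 0 := by
  induction rest generalizing m prev with
  | nil => simp [pvLevBGo, pvRowsFrom]
  | cons cy rest ih =>
    rw [PySem.List.enumerate_cons]
    simp only [pvLevBGo, pvRowsFrom, pvNextRow, PySem.List.enumerate_cons, List.any_cons]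
    set h0 : Int := PySem.List.pyGetD prev 0 0 + 1 with hh0
    set new : List Int := h0 :: pvLevBRow cy (x.zip (prev.zip prev.tail)) h0 with hnew
    have hok : pvRowOk x.length leny t ((m : Int) + 1) new
        = (decide (h0 ≤ t) ||
          (PySem.List.enumerate (PySem.List.slice new (some 1) none) 1).any
            (fun p => p.2 < t ||
              (p.2 == t && ((x.length : Int) - p.1 == (leny : Int) - ((m : Int) + 1))))) := by
      rw [pvRowOk, hnew]
      simp [PySem.List.pyGetD_zero_cons]
    by_cases hc : pvRowOk x.length leny t ((m : Int) + 1) new = true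
    · rw [← hok] at *
      simp only [hc, Bool.not_true, Bool.false_or]
      rw [if_neg (by simp), List.getLastD_cons]
      have := ih (m + 1) new
      rw [show (((m+1 : Nat)) : Int) + 1 = ((m : Int) + 1) + 1 by push_cast; ring] at this
      exact this
    · rw [← hok] at *
      have hcf : pvRowOk x.length leny t ((m : Int) + 1) new = false := by
        simpa using hc
      simp [hcf]

theorem pvLev_eq (x y : List Char) (t : Int) : pvLevA x y t = pvLevB x y t := by
  unfold pvLevA pvLevB
  simp only []
  rw [pv_init x.length x.length (le_refl _)]
  simp only [Nat.sub_self, List.replicate_zero, List.append_nil]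
  set row0 : List Int := PySem.List.pyRange 0 ((x.length : Int) + 1) 1 with hrow0
  have h := pv_outer x y t 0 (by omega) row0 (List.replicate (x.length + 1) 0)
    (by rw [hrow0, PySem.List.length_pyRange_one]; omega) (by simp)
  simp only [Nat.cast_zero, zero_add, List.drop_zero] at h
  have h2 := pvBGo_eq x y.length t y 0 row0
  simp only [Nat.cast_zero, zero_add] at h2
  rw [h, h2]
  rw [PySem.List.slice_from_one]
  simp only [List.tail_cons]
  congr 1
  rw [PySem.List.pyGetD_neg_one (xs := row0 :: pvRowsFrom x y row0) (h := by simp)]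
  rw [pv_getLast_cons]

-- ===== VERDICT (by name: the statement is the Claim_ definition above) =====
theorem levenshtein_cota_optimista_spec : Claim_equal_levenshtein_cota_optimista := by
  intro x y threshold _
  unfold Spec_levenshtein_cota_optimista levenshtein_cota_optimista levenshtein_cota_optimista_alt
  simp only []
  rw [pv_bound_eq x.toList y.toList, pvLev_eq]
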